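-- pv_equiv track=rewrite | github.com/andrewschultz/miscellany | python/wdl.py | get_let_freq
-- ===== SOURCE A (Python) =====
-- from collections import defaultdict
-- from string import ascii_lowercase
--
-- def get_let_freq(word_array):
--     word_freq = defaultdict(int)
--     let_freq = defaultdict(int)
--     for a in ascii_lowercase:
--         for w in word_array:
--             word_freq[a] += a in w
--             let_freq[a] += w.count(a)
--     return (word_freq, let_freq)
-- ===== SOURCE B (Python) =====
-- from collections import defaultdict
-- from string import ascii_lowercase
--
-- def get_let_freq(word_array):
--     word_freq = defaultdict(int)
--     let_freq = defaultdict(int)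
--     for a in ascii_lowercase:
--         word_freq[a] = 0
--         let_freq[a] = 0
--     lower = set(ascii_lowercase)
--     for w in word_array:
--         for c in w:
--             if c in lower:
--                 let_freq[c] += 1
--         for c in set(w):
--             if c in lower:
--                 word_freq[c] += 1
--     return (word_freq, let_freq)
-- ===== Notes on version B (the rewrite author's own statement) =====
-- stated objective: faster
-- what changed: A scans the whole word list 26 times (one `in` substring test plus one .count scan per letter per word); B preinitializes the two letter tables and makes a single pass over the words, incrementing let_freq per character and word_freq per distinct lowercase character of each word.
-- intended difference: On the empty word list A returns two empty dicts (keys only materialize via the += lookups inside the word loop) while B returns the tables with all 26 letters at 0; B's value is the intended one since A itself lists all 26 letters (zeros included) on every non-empty input. — e.g. on get_let_freq([]): A returns ([], []), B returns ([("a", 0), ("b", 0), ("c", 0), ("d", 0), ("e", 0), ("f", 0), ("g", 0), ("h", 0), ("i", 0), ("j", 0), ("k", 0), ("l", 0…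
import Mathlib
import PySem

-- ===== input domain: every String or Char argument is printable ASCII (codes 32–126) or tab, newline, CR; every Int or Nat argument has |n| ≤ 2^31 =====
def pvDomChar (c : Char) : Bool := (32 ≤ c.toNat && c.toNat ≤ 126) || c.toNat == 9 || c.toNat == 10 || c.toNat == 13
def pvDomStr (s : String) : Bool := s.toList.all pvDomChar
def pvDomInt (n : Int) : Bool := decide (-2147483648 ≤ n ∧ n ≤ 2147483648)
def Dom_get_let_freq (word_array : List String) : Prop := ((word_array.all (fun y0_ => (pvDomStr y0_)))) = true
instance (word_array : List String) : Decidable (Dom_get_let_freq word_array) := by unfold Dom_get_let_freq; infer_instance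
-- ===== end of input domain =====

-- B replaces A's 26-letters × words repeated substring/count scans with one counting pass over the words [objective: faster]

-- ascii_lowercase, and the 1-char string a Python iteration over it yields
def pvLowerChars : List Char :=
  ['a','b','c','d','e','f','g','h','i','j','k','l','m',
   'n','o','p','q','r','s','t','u','v','w','x','y','z']

def pvOneStr (c : Char) : String := String.ofList [c]

-- ===== PORT A =====
def get_let_freq (word_array : List String) : (List (String × Int)) × (List (String × Int)) :=
  let r := (pvLowerChars.map pvOneStr).foldl
    (fun (st : PySem.Dict String Int × PySem.Dict String Int) a =>
      word_array.foldl
        (fun st w =>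
          (st.1.insert a (st.1.getD a 0 + (if PySem.Str.isIn a w then (1 : Int) else 0)),
           st.2.insert a (st.2.getD a 0 + (PySem.Str.count w a : Int)))) st)
    (PySem.Dict.empty, PySem.Dict.empty)
  (r.1.items, r.2.items)

-- ===== PORT B =====
def get_let_freq_alt (word_array : List String) : (List (String × Int)) × (List (String × Int)) :=
  let init := (pvLowerChars.map pvOneStr).foldl
    (fun (st : PySem.Dict String Int × PySem.Dict String Int) a =>
      (st.1.insert a 0, st.2.insert a 0))
    (PySem.Dict.empty, PySem.Dict.empty)
  let lower : PySem.Set Char := PySem.Set.ofList pvLowerChars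
  let r := word_array.foldl
    (fun (st : PySem.Dict String Int × PySem.Dict String Int) w =>
      ((PySem.Set.ofList w.toList).foldl
         (fun d c => if PySem.Set.contains lower c then d.insert (pvOneStr c) (d.getD (pvOneStr c) 0 + 1) else d) st.1,
       w.toList.foldl
         (fun d c => if PySem.Set.contains lower c then d.insert (pvOneStr c) (d.getD (pvOneStr c) 0 + 1) else d) st.2))
    init
  (r.1.items, r.2.items)

-- ===== PRECONDITION & SPEC =====
-- On the empty word list A returns two EMPTY dicts (its keys materialize only as a side effect of the
-- `+=` lookups inside the word loop) while B returns the preinitialized tables with all 26 letters at 0;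
-- B's value is the intended one, since on every non-empty input A itself lists all 26 letters (zeros included).
def D_get_let_freq (word_array : List String) : Prop := word_array = []
instance (word_array : List String) : Decidable (D_get_let_freq word_array) := by
  unfold D_get_let_freq; infer_instance

def Spec_get_let_freq (word_array : List String) (out : (List (String × Int)) × (List (String × Int))) : Prop := ¬ D_get_let_freq word_array → out = get_let_freq_alt word_array
instance (word_array : List String) (out : (List (String × Int)) × (List (String × Int))) : Decidable (Spec_get_let_freq word_array out) := by unfold Spec_get_let_freq; infer_instance

def pvDiffWitness_get_let_freq : List String := []
def pvDiffWitnessOut_get_let_freq : ((List (String × Int)) × (List (String × Int))) × ((List (String × Int)) × (List (String × Int))) :=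
  (([], []), ([("a", 0), ("b", 0), ("c", 0), ("d", 0), ("e", 0), ("f", 0), ("g", 0), ("h", 0), ("i", 0), ("j", 0), ("k", 0), ("l", 0), ("m", 0), ("n", 0), ("o", 0), ("p", 0), ("q", 0), ("r", 0), ("s", 0), ("t", 0), ("u", 0), ("v", 0), ("w", 0), ("x", 0), ("y", 0), ("z", 0)], [("a", 0), ("b", 0), ("c", 0), ("d", 0), ("e", 0), ("f", 0), ("g", 0), ("h", 0), ("i", 0), ("j", 0), ("k", 0), ("l", 0), ("m", 0), ("n", 0), ("o", 0), ("p", 0), ("q", 0), ("r", 0), ("s", 0), ("t", 0), ("u", 0), ("v", 0), ("w", 0), ("x", 0), ("y", 0), ("z", 0)]))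

-- ===== CLAIM (what is proved, stated in full; the proofs are below) =====
def Claim_unchanged_get_let_freq : Prop := ∀ (word_array : List String), Dom_get_let_freq word_array → Spec_get_let_freq word_array (get_let_freq word_array)
def Claim_changed_get_let_freq : Prop := Dom_get_let_freq (pvDiffWitness_get_let_freq) ∧ D_get_let_freq (pvDiffWitness_get_let_freq) ∧ get_let_freq (pvDiffWitness_get_let_freq) = pvDiffWitnessOut_get_let_freq.1 ∧ get_let_freq_alt (pvDiffWitness_get_let_freq) = pvDiffWitnessOut_get_let_freq.2 ∧ pvDiffWitnessOut_get_let_freq.1 ≠ pvDiffWitnessOut_get_let_freq.2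
def Claim_exact_get_let_freq : Prop := ∀ (word_array : List String), Dom_get_let_freq word_array → D_get_let_freq word_array → get_let_freq word_array ≠ get_let_freq_alt word_array

-- ===== LEMMAS AND PROOFS =====

-- the dict whose keys are the 26 lowercase letters in order, with values given by g
def pvMkD (g : Char → Int) : PySem.Dict String Int :=
  PySem.Dict.mk (pvLowerChars.map (fun c => (pvOneStr c, g c)))

-- per-letter totals A computes: number of words containing the letter, total occurrence count
def pvSWF (wa : List String) (a : String) : Int :=
  (wa.map (fun w => if PySem.Str.isIn a w then (1 : Int) else 0)).sum
def pvSLF (wa : List String) (a : String) : Int :=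
  (wa.map (fun w => (PySem.Str.count w a : Int))).sum

theorem pvOneStr_inj {a b : Char} (h : pvOneStr a = pvOneStr b) : a = b := by
  have := String.ofList_inj.mp h
  simpa using this

theorem pv_go_singleton (c : Char) : ∀ (fuel : Nat) (l : List Char) (acc : Nat),
    l.length ≤ fuel → PySem.Chars.count.go [c] fuel l acc = acc + l.count c := by
  intro fuel
  induction fuel with
  | zero =>
    intro l acc h
    have hl : l = [] := List.eq_nil_of_length_eq_zero (Nat.le_zero.mp h)
    subst hl
    rfl
  | succ n ih =>
    intro l acc h
    cases l with
    | nil => rfl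
    | cons x t =>
      rw [show PySem.Chars.count.go [c] (n+1) (x::t) acc
            = if [c].isPrefixOf (x::t) then PySem.Chars.count.go [c] n (List.drop 1 (x::t)) (acc+1)
              else PySem.Chars.count.go [c] n t acc from rfl]
      have hlen : t.length ≤ n := by simpa using h
      by_cases hcx : c = x
      · subst hcx
        have hpre : [c].isPrefixOf (c::t) = true := by simp [List.isPrefixOf]
        rw [if_pos hpre]
        simp only [List.drop_succ_cons, List.drop_zero]
        rw [ih t (acc+1) hlen, List.count_cons_self]
        omega
      · have hpre : [c].isPrefixOf (x::t) = false := by simp [List.isPrefixOf]; exact fun h => hcx h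
        rw [if_neg (by simp [hpre])]
        rw [ih t acc hlen, List.count_cons_of_ne (fun a => hcx (Eq.symm a))]

theorem pv_count_singleton (s : List Char) (c : Char) :
    PySem.Chars.count s [c] = s.count c := by
  have h := pv_go_singleton c s.length s 0 (le_refl _)
  simpa [PySem.Chars.count] using h

theorem pv_isIn_singleton (w : String) (c : Char) :
    PySem.Str.isIn (pvOneStr c) w = w.toList.contains c := by
  by_cases hm : c ∈ w.toList
  · have h1 : PySem.Str.isIn (pvOneStr c) w = true := by
      rw [PySem.Str.isIn_iff_infix]
      simpa [pvOneStr, List.singleton_infix_iff] using hm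
    have h2 : w.toList.contains c = true := by simpa using hm
    rw [h1, h2]
  · have h1 : ¬ PySem.Str.isIn (pvOneStr c) w = true := by
      rw [PySem.Str.isIn_iff_infix]
      simpa [pvOneStr, List.singleton_infix_iff] using hm
    rw [Bool.not_eq_true] at h1
    have h2 : w.toList.contains c = false := by simpa using hm
    rw [h1, h2]

-- A's inner word loop for one letter: a fold of `d[a] = d.get(a,0) + g w` over a NONEMPTY list
theorem pvA_inner (l : List String) (hl : l ≠ []) :
    ∀ (d : PySem.Dict String Int) (a : String) (g : String → Int),
    l.foldl (fun d w => d.insert a (d.getD a 0 + g w)) d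
      = d.insert a (d.getD a 0 + (l.map g).sum) := by
  induction l with
  | nil => exact absurd rfl hl
  | cons x t ih =>
    intro d a g
    by_cases ht : t = []
    · subst ht; simp
    · rw [List.foldl_cons, ih ht (d.insert a (d.getD a 0 + g x)) a g]
      rw [PySem.Dict.getD_insert_self, PySem.Dict.insert_insert_self]
      rw [List.map_cons, List.sum_cons, ← add_assoc]

-- A's outer letter loop over fresh, distinct keys appends one entry per letter
theorem pvA_eval (ks : List String) :
    ∀ (wa : List String), wa ≠ [] → ks.Nodup →
    ∀ (d1 d2 : PySem.Dict String Int),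
    (∀ a ∈ ks, d1.contains a = false) → (∀ a ∈ ks, d2.contains a = false) →
    ks.foldl
      (fun (st : PySem.Dict String Int × PySem.Dict String Int) a =>
        wa.foldl
          (fun st w =>
            (st.1.insert a (st.1.getD a 0 + (if PySem.Str.isIn a w then (1 : Int) else 0)),
             st.2.insert a (st.2.getD a 0 + (PySem.Str.count w a : Int)))) st)
      (d1, d2)
      = (PySem.Dict.mk (d1.items ++ ks.map (fun a => (a, pvSWF wa a))),
         PySem.Dict.mk (d2.items ++ ks.map (fun a => (a, pvSLF wa a)))) := by
  induction ks with
  | nil =>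
    intro wa hwa hnd d1 d2 h1 h2
    simp
  | cons a ks ih =>
    intro wa hwa hnd d1 d2 h1 h2
    have hsplit :
        wa.foldl
          (fun (st : PySem.Dict String Int × PySem.Dict String Int) w =>
            (st.1.insert a (st.1.getD a 0 + (if PySem.Str.isIn a w then (1 : Int) else 0)),
             st.2.insert a (st.2.getD a 0 + (PySem.Str.count w a : Int)))) (d1, d2)
        = (wa.foldl (fun d w => d.insert a (d.getD a 0 + (if PySem.Str.isIn a w then (1 : Int) else 0))) d1,
           wa.foldl (fun d w => d.insert a (d.getD a 0 + (PySem.Str.count w a : Int))) d2) :=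
      PySem.List.foldl_prod_mk
        (fun (d : PySem.Dict String Int) w => d.insert a (d.getD a 0 + (if PySem.Str.isIn a w then (1 : Int) else 0)))
        (fun (d : PySem.Dict String Int) w => d.insert a (d.getD a 0 + (PySem.Str.count w a : Int)))
        wa d1 d2
    have hc1 : d1.contains a = false := h1 a (by simp)
    have hc2 : d2.contains a = false := h2 a (by simp)
    have hfresh1 : ∀ b ∈ ks, (d1.insert a (pvSWF wa a)).contains b = false := by
      intro b hb
      have hba : (b == a) = false := by
        apply beq_eq_false_iff_ne.mpr
        rintro rfl; exact (List.nodup_cons.mp hnd).1 hb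
      rw [PySem.Dict.contains_insert, hba, h1 b (by simp [hb])]
      rfl
    have hfresh2 : ∀ b ∈ ks, (d2.insert a (pvSLF wa a)).contains b = false := by
      intro b hb
      have hba : (b == a) = false := by
        apply beq_eq_false_iff_ne.mpr
        rintro rfl; exact (List.nodup_cons.mp hnd).1 hb
      rw [PySem.Dict.contains_insert, hba, h2 b (by simp [hb])]
      rfl
    rw [List.foldl_cons]
    rw [hsplit,
      pvA_inner wa hwa d1 a (fun w => if PySem.Str.isIn a w then (1 : Int) else 0),
      pvA_inner wa hwa d2 a (fun w => (PySem.Str.count w a : Int)),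
      PySem.Dict.getD_of_not_contains _ _ hc1, PySem.Dict.getD_of_not_contains _ _ hc2]
    rw [show d1.insert a (0 + (wa.map (fun w => if PySem.Str.isIn a w then (1 : Int) else 0)).sum)
          = d1.insert a (pvSWF wa a) from by rw [zero_add]; rfl]
    rw [show d2.insert a (0 + (wa.map (fun w => (PySem.Str.count w a : Int))).sum)
          = d2.insert a (pvSLF wa a) from by rw [zero_add]; rfl]
    rw [ih wa hwa (List.nodup_cons.mp hnd).2 _ _ hfresh1 hfresh2]
    rw [PySem.Dict.items_insert_of_not_contains _ _ hc1,
        PySem.Dict.items_insert_of_not_contains _ _ hc2]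
    simp

theorem pvMk_keys (g : Char → Int) : (pvMkD g).keys = pvLowerChars.map pvOneStr := by
  simp only [pvMkD, PySem.Dict.keys]
  simp [Function.comp]

theorem pvLower_nodup_strs : (pvLowerChars.map pvOneStr).Nodup := by decide

theorem pvMk_getD (g : Char → Int) (c : Char) (hc : c ∈ pvLowerChars) :
    (pvMkD g).getD (pvOneStr c) 0 = g c := by
  have hmem : (pvOneStr c, g c) ∈ (pvMkD g).items := by
    show (pvOneStr c, g c) ∈ pvLowerChars.map (fun c => (pvOneStr c, g c))
    exact List.mem_map.mpr ⟨c, hc, rfl⟩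
  exact PySem.Dict.getD_of_mem_items _ hmem (by rw [pvMk_keys]; exact pvLower_nodup_strs) 0

theorem pvMk_insert (g : Char → Int) (c : Char) (hc : c ∈ pvLowerChars) (v : Int) :
    (pvMkD g).insert (pvOneStr c) v = pvMkD (fun c' => if c' = c then v else g c') := by
  have hcont : (pvMkD g).contains (pvOneStr c) = true := by
    rw [PySem.Dict.contains_iff_mem_keys, pvMk_keys]
    exact List.mem_map.mpr ⟨c, hc, rfl⟩
  apply PySem.Dict.ext
  rw [PySem.Dict.items_insert_of_contains _ _ hcont]
  simp only [pvMkD]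
  rw [List.map_map]
  apply List.map_congr_left
  intro c' _
  by_cases h : c' = c
  · subst h; simp
  · have hne : (pvOneStr c' == pvOneStr c) = false :=
      beq_eq_false_iff_ne.mpr (fun he => h (pvOneStr_inj he))
    simp [Function.comp, h, hne]

-- B's per-word character loop on a fully-keyed table adds the (lowercase-filtered) character counts
theorem pv_charfold (cs : List Char) :
    ∀ (g : Char → Int),
    cs.foldl
      (fun d c => if PySem.Set.contains (PySem.Set.ofList pvLowerChars) c
                  then d.insert (pvOneStr c) (d.getD (pvOneStr c) 0 + 1) else d)
      (pvMkD g)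
      = pvMkD (fun c => g c +
          ((cs.filter (fun c => PySem.Set.contains (PySem.Set.ofList pvLowerChars) c)).count c : Int)) := by
  induction cs with
  | nil =>
    intro g
    simp
  | cons x t ih =>
    intro g
    by_cases hx : PySem.Set.contains (PySem.Set.ofList pvLowerChars) x = true
    · have hxm : x ∈ pvLowerChars := by
        have := (PySem.Set.contains_iff _ _).mp hx
        simpa [PySem.Set.mem_ofList] using this
      rw [List.foldl_cons, if_pos hx, pvMk_getD g x hxm, pvMk_insert g x hxm, ih]
      apply congrArg pvMkD
      funext c
      rw [List.filter_cons_of_pos hx]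
      by_cases hcx : c = x
      · subst hcx
        rw [if_pos rfl, List.count_cons_self]
        push_cast
        ring
      · rw [if_neg hcx, List.count_cons_of_ne (fun a => hcx (Eq.symm a))]
    · rw [List.foldl_cons, if_neg hx, ih]
      apply congrArg pvMkD
      funext c
      rw [List.filter_cons_of_neg (by simpa using hx)]

-- B's single pass over the words, both tables at once
theorem pvB_eval (wa : List String) :
    ∀ (g1 g2 : Char → Int),
    wa.foldl
      (fun (st : PySem.Dict String Int × PySem.Dict String Int) w =>
        ((PySem.Set.ofList w.toList).foldl
           (fun d c => if PySem.Set.contains (PySem.Set.ofList pvLowerChars) c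
                       then d.insert (pvOneStr c) (d.getD (pvOneStr c) 0 + 1) else d) st.1,
         w.toList.foldl
           (fun d c => if PySem.Set.contains (PySem.Set.ofList pvLowerChars) c
                       then d.insert (pvOneStr c) (d.getD (pvOneStr c) 0 + 1) else d) st.2))
      (pvMkD g1, pvMkD g2)
      = (pvMkD (fun c => g1 c +
           (wa.map (fun w => (((PySem.Set.ofList w.toList).filter
              (fun c => PySem.Set.contains (PySem.Set.ofList pvLowerChars) c)).count c : Int))).sum),
         pvMkD (fun c => g2 c +
           (wa.map (fun w => ((w.toList.filter
              (fun c => PySem.Set.contains (PySem.Set.ofList pvLowerChars) c)).count c : Int))).sum)) := by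
  induction wa with
  | nil =>
    intro g1 g2
    simp
  | cons w t ih =>
    intro g1 g2
    rw [List.foldl_cons]
    show t.foldl _ ((PySem.Set.ofList w.toList).foldl _ (pvMkD g1), w.toList.foldl _ (pvMkD g2)) = _
    rw [pv_charfold (PySem.Set.ofList w.toList) g1, pv_charfold w.toList g2, ih]
    refine Prod.ext ?_ ?_ <;>
    · apply congrArg pvMkD
      funext c
      simp only [List.map_cons, List.sum_cons]
      ring

-- ===== VERDICT (by name: the statement is the Claim_ definition above) =====
theorem get_let_freq_spec : Claim_unchanged_get_let_freq := by
  intro wa hdom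
  unfold Spec_get_let_freq
  intro hD
  have hwa : wa ≠ [] := hD
  simp only [get_let_freq, get_let_freq_alt]
  rw [pvA_eval (pvLowerChars.map pvOneStr) wa hwa pvLower_nodup_strs PySem.Dict.empty PySem.Dict.empty
        (by intro a _; simp) (by intro a _; simp)]
  have hinit : (pvLowerChars.map pvOneStr).foldl
      (fun (st : PySem.Dict String Int × PySem.Dict String Int) a => (st.1.insert a 0, st.2.insert a 0))
      (PySem.Dict.empty, PySem.Dict.empty)
      = (pvMkD (fun _ => 0), pvMkD (fun _ => 0)) := by rfl
  rw [hinit, pvB_eval wa (fun _ => 0) (fun _ => 0)]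
  simp only [pvMkD, PySem.Dict.empty, List.nil_append, List.map_map]
  rw [Prod.mk.injEq]
  constructor
  · apply List.map_congr_left
    intro c hc
    have hcnd : (PySem.Set.contains (PySem.Set.ofList pvLowerChars) c) = true := by
      rw [PySem.Set.contains_iff]
      simpa [PySem.Set.mem_ofList] using hc
    simp only [Function.comp_apply, Prod.mk.injEq, true_and, zero_add]
    rw [pvSWF]
    apply congrArg List.sum
    apply List.map_congr_left
    intro w hw
    rw [List.count_filter hcnd, pv_isIn_singleton]
    by_cases hm : c ∈ w.toList
    · rw [List.count_eq_one_of_mem (PySem.Set.nodup_ofList _) ((PySem.Set.mem_ofList _ _).mpr hm)]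
      have h2 : w.toList.contains c = true := by simpa using hm
      rw [h2]
      simp
    · rw [List.count_eq_zero.mpr (fun hmem => hm ((PySem.Set.mem_ofList _ _).mp hmem))]
      have h2 : w.toList.contains c = false := by simpa using hm
      rw [h2]
      simp
  · apply List.map_congr_left
    intro c hc
    have hcnd : (PySem.Set.contains (PySem.Set.ofList pvLowerChars) c) = true := by
      rw [PySem.Set.contains_iff]
      simpa [PySem.Set.mem_ofList] using hc
    simp only [Function.comp_apply, Prod.mk.injEq, true_and, zero_add]
    rw [pvSLF]
    apply congrArg List.sum
    apply List.map_congr_left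
    intro w hw
    rw [List.count_filter hcnd]
    have hcn : PySem.Str.count w (pvOneStr c) = w.toList.count c := by
      simp [pvOneStr, pv_count_singleton]
    rw [hcn]

theorem get_let_freq_changed : Claim_changed_get_let_freq := by
  unfold Claim_changed_get_let_freq; decide

theorem get_let_freq_tight : Claim_exact_get_let_freq := by
  intro wa _ hD
  rw [hD]
  decide
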